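-- pv_equiv track=rewrite | github.com/lvaohui/SPython-compiler | spylexer.py | get_line_deep
-- ===== SOURCE A (Python) =====
-- def get_line_deep(line):
--     deep = 0
--     for s in line:
--         if s!=' ':
--             if deep % 4==0:
--                 return int(deep/4)
--             return -1
--         deep += 1
-- ===== SOURCE B (Python) =====
-- def get_line_deep(line):
--     stripped = line.lstrip(' ')
--     if not stripped:
--         return None
--     deep = len(line) - len(stripped)
--     return deep // 4 if deep % 4 == 0 else -1
-- ===== Notes on version B (the rewrite author's own statement) =====
-- stated objective: simpler
-- what changed: Replaces the explicit character loop with its running counter by length arithmetic: strip leading spaces with lstrip, derive the depth as the length difference, and classify it by divisibility by 4; no loop or counter is maintained.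
import Mathlib
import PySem

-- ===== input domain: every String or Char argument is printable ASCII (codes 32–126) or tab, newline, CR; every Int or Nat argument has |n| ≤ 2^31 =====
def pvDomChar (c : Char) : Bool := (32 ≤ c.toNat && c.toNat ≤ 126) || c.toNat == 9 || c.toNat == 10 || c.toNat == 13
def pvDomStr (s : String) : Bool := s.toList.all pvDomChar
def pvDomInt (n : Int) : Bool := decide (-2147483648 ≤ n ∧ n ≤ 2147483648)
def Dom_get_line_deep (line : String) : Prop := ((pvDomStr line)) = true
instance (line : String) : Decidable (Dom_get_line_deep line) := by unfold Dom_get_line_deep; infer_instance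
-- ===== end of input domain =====

-- B replaces A's per-character loop and counter by length arithmetic on the ' '-stripped string (objective: simpler).

-- ===== PORT A =====
-- the `for s in line` loop with its `deep` counter; falling off the loop returns None
def pvGoA : List Char → Int → Option Int
  | [], _ => none
  | c :: rest, deep =>
    if c ≠ ' ' then
      if deep % 4 == 0 then some (deep / 4)  -- int(deep/4): deep ≥ 0 and divisible by 4, exact
      else some (-1)
    else pvGoA rest (deep + 1)

def get_line_deep (line : String) : Option Int := pvGoA line.toList 0

-- ===== PORT B =====
def get_line_deep_alt (line : String) : Option Int :=
  let stripped := line.toList.dropWhile (· == ' ')   -- line.lstrip(' ')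
  if stripped.isEmpty then none
  else
    let deep : Int := (line.toList.length : Int) - stripped.length
    if deep % 4 == 0 then some (deep / 4) else some (-1)

-- ===== PRECONDITION & SPEC =====
def Spec_get_line_deep (line : String) (out : Option Int) : Prop := out = get_line_deep_alt line
instance (line : String) (out : Option Int) : Decidable (Spec_get_line_deep line out) := by unfold Spec_get_line_deep; infer_instance

-- ===== CLAIM (what is proved, stated in full; the proofs are below) =====
def Claim_equal_get_line_deep : Prop := ∀ (line : String), Dom_get_line_deep line → Spec_get_line_deep line (get_line_deep line)

-- ===== LEMMAS AND PROOFS =====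
lemma pvGoA_eq (l : List Char) (deep : Int) :
    pvGoA l deep =
      (let s := l.dropWhile (· == ' ')
       if s.isEmpty then none
       else if (deep + ((l.length : Int) - s.length)) % 4 == 0
            then some ((deep + ((l.length : Int) - s.length)) / 4)
            else some (-1)) := by
  induction l generalizing deep with
  | nil => simp [pvGoA]
  | cons c rest ih =>
    by_cases hc : c = ' '
    · subst hc
      simp only [pvGoA, List.dropWhile]
      have hle : (rest.dropWhile (· == ' ')).length ≤ rest.length :=
        List.length_dropWhile_le _ _
      simp only [ne_eq, not_true_eq_false, if_false, BEq.rfl]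
      rw [ih]
      simp only [List.length_cons]
      have harith : deep + 1 + ((rest.length : Int) - (rest.dropWhile (· == ' ')).length)
          = deep + (((rest.length + 1 : Nat) : Int) - (rest.dropWhile (· == ' ')).length) := by
        push_cast; ring
      rw [harith]
    · simp only [pvGoA, List.dropWhile]
      have hbe : (c == ' ') = false := by simp [hc]
      simp [hc, hbe]

theorem pvSpec_aux (line : String) : get_line_deep line = get_line_deep_alt line := by
  simp only [get_line_deep, get_line_deep_alt, pvGoA_eq]
  simp

-- ===== VERDICT (by name: the statement is the Claim_ definition above) =====
theorem get_line_deep_spec : Claim_equal_get_line_deep := by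
  intro line _
  exact pvSpec_aux line
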